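-- pv_equiv track=rewrite | github.com/LucasLiuXinqi/RUKA | Visual/tracking.py | pingpong_indices
-- ===== SOURCE A (Python) =====
-- def pingpong_indices(n: int, cycles: int):
--     """
--     Yield (idx, dir_flag) where dir_flag=0 for forward, 1 for reverse.
--     Sequence: 0..N-1, N-2..1, 0..N-1, ...
--     """
--     if n < 2:
--         raise ValueError("num_positions must be >= 2.")
--     fwd = list(range(0, n))          # include endpoints
--     rev = list(range(n - 2, 0, -1))  # exclude endpoints
--     for _ in range(cycles):
--         for i in fwd:
--             yield i, 0
--         for i in rev:
--             yield i, 1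
-- ===== SOURCE B (Python) =====
-- def pingpong_indices(n: int, cycles: int):
--     """Same pingpong (idx, dir) sequence, built as one flat list by a
--     modular-reflection formula instead of nested per-cycle loops."""
--     if n < 2:
--         raise ValueError("num_positions must be >= 2.")
--     period = 2 * (n - 1)
--     phases = (t % period for t in range(cycles * period))
--     return [(p, 0) if p < n else (period - p, 1) for p in phases]
-- ===== Notes on version B (the rewrite author's own statement) =====
-- stated objective: simpler
-- what changed: Instead of building fwd/rev index lists and appending them cycle by cycle in nested loops, B computes the whole sequence as one list comprehension over a flat counter, mapping each tick t to its phase t % (2*(n-1)) and reflecting phases past the top (period - p).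
import Mathlib
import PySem

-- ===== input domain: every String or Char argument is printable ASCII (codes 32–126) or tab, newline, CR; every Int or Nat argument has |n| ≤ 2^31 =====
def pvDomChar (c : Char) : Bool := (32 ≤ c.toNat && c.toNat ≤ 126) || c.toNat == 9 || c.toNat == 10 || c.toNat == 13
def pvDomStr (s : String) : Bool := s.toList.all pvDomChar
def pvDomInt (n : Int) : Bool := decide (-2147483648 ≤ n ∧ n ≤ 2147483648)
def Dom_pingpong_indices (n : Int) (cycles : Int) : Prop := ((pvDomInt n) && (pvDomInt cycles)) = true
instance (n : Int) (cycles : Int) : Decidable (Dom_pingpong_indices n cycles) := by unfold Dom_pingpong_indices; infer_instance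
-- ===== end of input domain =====

-- B builds the whole sequence as one map over a flat modular counter instead of nested per-cycle append loops; objective: simpler.


-- ===== PORT A =====
def pingpong_indices (n : Int) (cycles : Int) : List (Int × Int) :=
  if n < 2 then []  -- Python raises ValueError here; excluded by Pre_
  else
    let fwd := PySem.List.pyRange 0 n 1
    let rev := PySem.List.pyRange (n - 2) 0 (-1)
    (PySem.List.pyRange 0 cycles 1).foldl (fun acc _ =>
      let acc1 := fwd.foldl (fun a i => a ++ [(i, (0 : Int))]) acc
      rev.foldl (fun a i => a ++ [(i, (1 : Int))]) acc1) []

-- ===== PORT B =====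
def pingpong_indices_alt (n : Int) (cycles : Int) : List (Int × Int) :=
  if n < 2 then []  -- Python raises ValueError here; excluded by Pre_
  else
    let period := 2 * (n - 1)
    let phases := (PySem.List.pyRange 0 (cycles * period) 1).map (fun t => PySem.Int.mod t period)
    phases.map (fun p => if p < n then (p, (0 : Int)) else (period - p, (1 : Int)))

-- ===== PRECONDITION & SPEC =====
-- Pre_ excludes exactly n < 2, where Python A raises ValueError (B raises the same error there).
def Pre_pingpong_indices (n : Int) (cycles : Int) : Prop := 2 ≤ n
instance (n : Int) (cycles : Int) : Decidable (Pre_pingpong_indices n cycles) := by unfold Pre_pingpong_indices; infer_instance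
def pvWitness_pingpong_indices : Int × Int := (3, 2)

def Spec_pingpong_indices (n : Int) (cycles : Int) (out : List (Int × Int)) : Prop := out = pingpong_indices_alt n cycles
instance (n : Int) (cycles : Int) (out : List (Int × Int)) : Decidable (Spec_pingpong_indices n cycles out) := by unfold Spec_pingpong_indices; infer_instance

-- ===== CLAIM (what is proved, stated in full; the proofs are below) =====
def Claim_equal_pingpong_indices : Prop := ∀ (n : Int) (cycles : Int), Dom_pingpong_indices n cycles → Pre_pingpong_indices n cycles → Spec_pingpong_indices n cycles (pingpong_indices n cycles)

-- ===== LEMMAS AND PROOFS =====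

-- one cycle's block, as B computes it
def pvBlock (n : Int) : List (Int × Int) :=
  (PySem.List.pyRange 0 (2 * (n - 1)) 1).map (fun p =>
    if p < n then (p, (0 : Int)) else (2 * (n - 1) - p, (1 : Int)))

-- a constant flatMap is a flattened replicate
lemma pv_flatMap_const {α β : Type} (l : List α) (b : List β) :
    l.flatMap (fun _ => b) = (List.replicate l.length b).flatten := by
  induction l with
  | nil => rfl
  | cons x t ih => simp [List.flatMap_cons, List.replicate_succ, ih]

-- shift a unit range
lemma pv_pyRange_shift (a b s : Int) :
    PySem.List.pyRange (a + s) (b + s) 1 = (PySem.List.pyRange a b 1).map (· + s) := by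
  rw [PySem.List.pyRange_one, PySem.List.pyRange_one]
  have : b + s - (a + s) = b - a := by ring
  rw [this, List.map_map]
  refine List.map_congr_left (fun k _ => ?_)
  simp; ring

-- B's map over c full periods is c copies of the block
lemma pv_chunks (n : Int) (hn : 2 ≤ n) (c : Nat) :
    (PySem.List.pyRange 0 ((c : Int) * (2 * (n - 1))) 1).map (fun t =>
      if PySem.Int.mod t (2 * (n - 1)) < n then (PySem.Int.mod t (2 * (n - 1)), (0 : Int))
      else (2 * (n - 1) - PySem.Int.mod t (2 * (n - 1)), (1 : Int)))
    = (List.replicate c (pvBlock n)).flatten := by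
  set P : Int := 2 * (n - 1) with hP
  have hPpos : 0 < P := by omega
  induction c with
  | zero => simp [PySem.List.pyRange_one_eq_nil]
  | succ c ih =>
    have hsplit : PySem.List.pyRange 0 (((c : Int) + 1) * P) 1
        = PySem.List.pyRange 0 ((c : Int) * P) 1 ++ PySem.List.pyRange ((c : Int) * P) (((c : Int) + 1) * P) 1 :=
      PySem.List.pyRange_one_append 0 ((c : Int) * P) (((c : Int) + 1) * P)
        (by positivity) (by nlinarith)
    have hshift : PySem.List.pyRange ((c : Int) * P) (((c : Int) + 1) * P) 1
        = (PySem.List.pyRange 0 P 1).map (· + (c : Int) * P) := by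
      have := pv_pyRange_shift 0 P ((c : Int) * P)
      simpa [add_comm, add_mul, one_mul] using this
    push_cast
    rw [hsplit, List.map_append, ih, hshift, List.map_map, List.replicate_succ']
    rw [List.flatten_append]
    congr 1
    simp only [List.flatten_cons, List.flatten_nil, List.append_nil]
    unfold pvBlock
    refine List.map_congr_left (fun p hp => ?_)
    rw [PySem.List.mem_pyRange_one] at hp
    have hmod : PySem.Int.mod (p + (c : Int) * P) P = p := by
      rw [PySem.Int.mod_eq_emod_of_pos hPpos]
      rw [Int.add_mul_emod_self_right]
      exact Int.emod_eq_of_lt hp.1 hp.2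
    simp only [Function.comp, ← hP, hmod]

-- the block equals A's fwd/rev concatenation
lemma pv_block_eq (n : Int) (hn : 2 ≤ n) :
    pvBlock n = (PySem.List.pyRange 0 n 1).map (fun i => (i, (0 : Int)))
      ++ (PySem.List.pyRange (n - 2) 0 (-1)).map (fun i => (i, (1 : Int))) := by
  unfold pvBlock
  rw [PySem.List.pyRange_one_append 0 n (2 * (n - 1)) (by omega) (by omega), List.map_append]
  congr 1
  · refine List.map_congr_left (fun p hp => ?_)
    rw [PySem.List.mem_pyRange_one] at hp
    simp [hp.2]
  · rw [PySem.List.pyRange_one, PySem.List.pyRange_neg_one, List.map_map, List.map_map]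
    have hlen : 2 * (n - 1) - n = n - 2 - 0 := by ring
    rw [hlen]
    refine List.map_congr_left (fun k hk => ?_)
    rw [List.mem_range] at hk
    have hk' : (k : Int) < n - 2 := by omega
    have hnot : ¬ (n + (k : Int) < n) := by omega
    simp [hnot]
    ring

-- ===== VERDICT (by name: the statement is the Claim_ definition above) =====
theorem pingpong_indices_spec : Claim_equal_pingpong_indices := by
  intro n cycles _ hpre
  have hn2 : 2 ≤ n := hpre
  unfold Spec_pingpong_indices pingpong_indices pingpong_indices_alt
  have hnlt : ¬ n < 2 := by omega
  simp only [hnlt, if_false]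
  set P : Int := 2 * (n - 1) with hP
  have hPpos : 0 < P := by omega
  -- A side: each cycle appends the block
  have hA : (PySem.List.pyRange 0 cycles 1).foldl (fun acc _ =>
        let acc1 := (PySem.List.pyRange 0 n 1).foldl (fun a i => a ++ [(i, (0 : Int))]) acc
        (PySem.List.pyRange (n - 2) 0 (-1)).foldl (fun a i => a ++ [(i, (1 : Int))]) acc1) []
      = (List.replicate cycles.toNat (pvBlock n)).flatten := by
    have hbody : ∀ (acc : List (Int × Int)) (x : Int), x ∈ PySem.List.pyRange 0 cycles 1 →
        (let acc1 := (PySem.List.pyRange 0 n 1).foldl (fun a i => a ++ [(i, (0 : Int))]) acc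
         (PySem.List.pyRange (n - 2) 0 (-1)).foldl (fun a i => a ++ [(i, (1 : Int))]) acc1)
        = acc ++ pvBlock n := by
      intro acc x _
      simp only [PySem.List.foldl_append_singleton_eq_map]
      rw [pv_block_eq n hn2, List.append_assoc]
    rw [PySem.List.foldl_congr_mem _ _ (fun acc _ => acc ++ pvBlock n) _ hbody,
        PySem.List.foldl_append_eq_flatMap (g := fun _ => pvBlock n),
        pv_flatMap_const, PySem.List.length_pyRange_one]
    simp
  -- B side: the composed map is cycles copies of the block
  have hB : ((PySem.List.pyRange 0 (cycles * P) 1).map (fun t => PySem.Int.mod t P)).map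
        (fun p => if p < n then (p, (0 : Int)) else (P - p, (1 : Int)))
      = (List.replicate cycles.toNat (pvBlock n)).flatten := by
    rw [List.map_map]
    have hcomp : ((fun p => if p < n then (p, (0 : Int)) else (P - p, (1 : Int))) ∘
          (fun t => PySem.Int.mod t P))
        = fun t => if PySem.Int.mod t P < n then (PySem.Int.mod t P, (0 : Int))
            else (2 * (n - 1) - PySem.Int.mod t P, (1 : Int)) := by
      funext t; by_cases h : PySem.Int.mod t P < n <;> simp [Function.comp, h, hP]
    rw [hcomp]
    by_cases hc : 0 ≤ cycles
    · have : cycles = (cycles.toNat : Int) := by omega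
      rw [this]
      exact pv_chunks n hn2 cycles.toNat
    · have h1 : cycles * P < 0 := mul_neg_of_neg_of_pos (by omega) hPpos
      have h2 : cycles.toNat = 0 := by omega
      rw [PySem.List.pyRange_one_eq_nil (by omega), h2]
      simp
  rw [hA, hB]
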